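-- pv_equiv track=rewrite | github.com/Mawyxx/Crypto-Snake-Arena | slither-reference/deobfuscate.py | _get_string_ranges
-- ===== SOURCE A (Python) =====
-- def _get_string_ranges(text: str) -> list[tuple[int, int]]:
--     """Return list of (start, end) ranges that are inside string literals."""
--     ranges = []
--     i = 0
--     in_str = None
--     str_start = 0
--     escape = False
--     while i < len(text):
--         if escape:
--             escape = False
--             i += 1
--             continue
--         if in_str:
--             if text[i] == in_str:
--                 ranges.append((str_start, i + 1))
--                 in_str = None
--             i += 1
--             continue
--         if text[i] in ('"', "'", "`"):
--             in_str = text[i]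
--             str_start = i
--             i += 1
--             continue
--         i += 1
--     return ranges
-- ===== SOURCE B (Python) =====
-- def _get_string_ranges(text: str) -> list[tuple[int, int]]:
--     """Return list of (start, end) ranges that are inside string literals."""
--     ranges = []
--     i = 0
--     n = len(text)
--     while i < n:
--         c = text[i]
--         if c in '"\'`':
--             j = text.find(c, i + 1)
--             if j == -1:
--                 break
--             ranges.append((i, j + 1))
--             i = j + 1
--         else:
--             i += 1
--     return ranges
-- ===== Notes on version B (the rewrite author's own statement) =====
-- stated objective: faster
-- what changed: Replaces the char-by-char state machine (in_str/str_start/escape flags, with escape dead code) by a quote-jump scan: on meeting a quote, str.find locates the matching close directly and the loop jumps past it.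
import Mathlib
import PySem

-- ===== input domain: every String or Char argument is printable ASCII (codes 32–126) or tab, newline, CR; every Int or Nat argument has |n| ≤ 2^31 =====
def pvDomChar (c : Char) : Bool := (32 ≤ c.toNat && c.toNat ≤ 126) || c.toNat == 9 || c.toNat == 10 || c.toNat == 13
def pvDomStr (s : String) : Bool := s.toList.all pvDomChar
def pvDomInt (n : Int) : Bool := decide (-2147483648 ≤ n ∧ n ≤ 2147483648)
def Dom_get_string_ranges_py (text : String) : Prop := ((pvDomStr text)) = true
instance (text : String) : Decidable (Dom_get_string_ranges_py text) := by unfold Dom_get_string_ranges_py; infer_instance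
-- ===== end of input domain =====

-- B replaces A's char-by-char state machine by a quote-jump scan using str.find (measured faster by a constant factor; A's escape flag is dead code).

-- ===== PORT A =====
-- literal port of A's while loop; the whole loop state (i, in_str, str_start, escape, ranges) is carried
def pvALoop (cs : List Char) (i : Nat) (inStr : Option Char) (strStart : Nat)
    (escape : Bool) (ranges : List (Int × Int)) : List (Int × Int) :=
  if _h : i < cs.length then
    if escape then
      pvALoop cs (i + 1) inStr strStart false ranges
    else
      match inStr with
      | some q =>
        if cs[i] = q then
          pvALoop cs (i + 1) none strStart false (ranges ++ [((strStart : Int), (i : Int) + 1)])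
        else
          pvALoop cs (i + 1) (some q) strStart false ranges
      | none =>
        if cs[i] = '"' ∨ cs[i] = '\'' ∨ cs[i] = '`' then
          pvALoop cs (i + 1) (some cs[i]) i false ranges
        else
          pvALoop cs (i + 1) none strStart false ranges
  else ranges
termination_by cs.length - i

def get_string_ranges_py (text : String) : List (Int × Int) :=
  pvALoop text.toList 0 none 0 false []

-- ===== PORT B =====
-- literal port of Source B: jump scan; text.find(c, i+1) is PySem.Str.findFrom (here on toList via Chars)
def pvBLoop (cs : List Char) (i : Nat) (ranges : List (Int × Int)) : List (Int × Int) :=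
  if _h : i < cs.length then
    let c := cs[i]
    if c = '"' ∨ c = '\'' ∨ c = '`' then
      let j : Int := PySem.Chars.findFrom cs [c] ((i : Int) + 1) none
      if j = -1 then ranges
      else pvBLoop cs (j.toNat + 1) (ranges ++ [((i : Int), j + 1)])
    else pvBLoop cs (i + 1) ranges
  else ranges
termination_by cs.length - i
decreasing_by
  · -- the found index is ≥ i+1, so the loop advances
    have hk : (i + 1 : Nat) ≤ cs.length := by omega
    have hcast : ((i + 1 : Nat) : Int) = (i : Int) + 1 := by push_cast; ring
    have hne : PySem.Chars.findFrom cs [cs[i]] ((i : Int) + 1) none ≠ -1 := by assumption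
    have hspec := PySem.Chars.findFrom_natCast_spec cs [cs[i]] (i + 1) hk (by rw [hcast]; exact hne)
    rw [hcast] at hspec
    have : i + 1 ≤ (PySem.Chars.findFrom cs [cs[i]] ((i : Int) + 1) none).toNat := by omega
    omega
  · omega

def get_string_ranges_py_alt (text : String) : List (Int × Int) :=
  pvBLoop text.toList 0 []

-- ===== PRECONDITION & SPEC =====
def Spec_get_string_ranges_py (text : String) (out : List (Int × Int)) : Prop := out = get_string_ranges_py_alt text
instance (text : String) (out : List (Int × Int)) : Decidable (Spec_get_string_ranges_py text out) := by unfold Spec_get_string_ranges_py; infer_instance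

-- ===== CLAIM (what is proved, stated in full; the proofs are below) =====
def Claim_equal_get_string_ranges_py : Prop := ∀ (text : String), Dom_get_string_ranges_py text → Spec_get_string_ranges_py text (get_string_ranges_py text)

-- ===== LEMMAS AND PROOFS =====

-- [c] is a prefix of cs.drop m  ↔  cs[m] = c
theorem pv_prefix_singleton_drop (cs : List Char) (c : Char) (m : Nat) :
    [c] <+: cs.drop m ↔ ∃ h : m < cs.length, cs[m] = c := by
  constructor
  · rintro ⟨t, ht⟩
    have hm : m < cs.length := by
      by_contra h
      have : cs.drop m = [] := List.drop_eq_nil_of_le (by omega)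
      rw [this] at ht; simp at ht
    refine ⟨hm, ?_⟩
    rw [List.drop_eq_getElem_cons hm] at ht
    simp only [List.singleton_append, List.cons.injEq] at ht
    exact ht.1.symm
  · rintro ⟨hm, hc⟩
    refine ⟨cs.drop (m + 1), ?_⟩
    rw [List.drop_eq_getElem_cons hm, hc]; rfl

-- [c] infix of l ↔ c ∈ l
theorem pv_infix_singleton (c : Char) (l : List Char) : [c] <:+: l ↔ c ∈ l := by
  constructor
  · intro h; exact h.sublist.mem (by simp)
  · intro h
    obtain ⟨s, t, rfl⟩ := List.append_of_mem h
    exact ⟨s, t, by simp⟩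

-- str.find(c, k) steps one char at a time
theorem pv_findFrom_step (cs : List Char) (c : Char) (k : Nat) (hk : k < cs.length) :
    PySem.Chars.findFrom cs [c] (k : Int) none =
      if cs[k] = c then (k : Int) else PySem.Chars.findFrom cs [c] ((k : Int) + 1) none := by
  have hk' : k ≤ cs.length := le_of_lt hk
  have hk1 : k + 1 ≤ cs.length := hk
  have hcast : ((k + 1 : Nat) : Int) = (k : Int) + 1 := by push_cast; ring
  split_ifs with hc
  · -- found at k
    have hne : PySem.Chars.findFrom cs [c] (k : Int) none ≠ -1 := fun h =>
      (PySem.Chars.findFrom_natCast_eq_neg_one_iff cs [c] k hk').1 h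
        (((pv_prefix_singleton_drop cs c k).2 ⟨hk, hc⟩).isInfix)
    obtain ⟨h1, h2, h3⟩ := PySem.Chars.findFrom_natCast_spec cs [c] k hk' hne
    rcases Nat.lt_or_ge k (PySem.Chars.findFrom cs [c] (k : Int) none).toNat with hlt | hge
    · exact absurd ((pv_prefix_singleton_drop cs c k).2 ⟨hk, hc⟩) (h3 k (le_refl _) hlt)
    · omega
  · -- not at k: result from k equals result from k+1
    by_cases h2 : PySem.Chars.findFrom cs [c] ((k : Int) + 1) none = -1
    · rw [h2]
      refine (PySem.Chars.findFrom_natCast_eq_neg_one_iff cs [c] k hk').2 ?_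
      have hnext := (PySem.Chars.findFrom_natCast_eq_neg_one_iff cs [c] (k + 1) hk1).1
        (by rw [hcast]; exact h2)
      intro hin
      apply hnext
      have hmem : c ∈ cs.drop k := (pv_infix_singleton c _).1 hin
      rw [List.drop_eq_getElem_cons hk] at hmem
      rcases List.mem_cons.1 hmem with h | h
      · exact absurd h.symm hc
      · exact (pv_infix_singleton c _).2 h
    · -- both nonneg: same minimal index
      obtain ⟨b1, b2, b3⟩ := PySem.Chars.findFrom_natCast_spec cs [c] (k + 1) hk1
        (by rw [hcast]; exact h2)
      rw [hcast] at b1 b2 b3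
      obtain ⟨hj'len, hj'c⟩ := (pv_prefix_singleton_drop cs c _).1 b2
      have hb1 : k + 1 ≤ (PySem.Chars.findFrom cs [c] ((k : Int) + 1) none).toNat := by omega
      have hdd : (cs.drop k).drop ((PySem.Chars.findFrom cs [c] ((k : Int) + 1) none).toNat - k)
          = cs.drop (PySem.Chars.findFrom cs [c] ((k : Int) + 1) none).toNat := by
        rw [List.drop_drop]; congr 1; omega
      have hne : PySem.Chars.findFrom cs [c] (k : Int) none ≠ -1 := fun h => by
        have hpre := (pv_prefix_singleton_drop cs c _).2 ⟨hj'len, hj'c⟩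
        rw [← hdd] at hpre
        exact (PySem.Chars.findFrom_natCast_eq_neg_one_iff cs [c] k hk').1 h
          (hpre.isInfix.trans (List.drop_suffix _ _).isInfix)
      obtain ⟨a1, a2, a3⟩ := PySem.Chars.findFrom_natCast_spec cs [c] k hk' hne
      obtain ⟨hjlen, hjc⟩ := (pv_prefix_singleton_drop cs c _).1 a2
      have hjk1 : k + 1 ≤ (PySem.Chars.findFrom cs [c] (k : Int) none).toNat := by
        rcases Nat.lt_or_ge (PySem.Chars.findFrom cs [c] (k : Int) none).toNat (k + 1) with h | h
        · have he : (PySem.Chars.findFrom cs [c] (k : Int) none).toNat = k := by omega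
          simp only [he] at hjc
          exact absurd hjc hc
        · exact h
      have hle1 : (PySem.Chars.findFrom cs [c] (k : Int) none).toNat
          ≤ (PySem.Chars.findFrom cs [c] ((k : Int) + 1) none).toNat := by
        by_contra h
        exact a3 _ (by omega) (by omega) b2
      have hle2 : (PySem.Chars.findFrom cs [c] ((k : Int) + 1) none).toNat
          ≤ (PySem.Chars.findFrom cs [c] (k : Int) none).toNat := by
        by_contra h
        exact b3 _ (by omega) (by omega) a2
      omega

-- in-string scan of A = one findFrom
theorem pv_scan (n : Nat) : ∀ (cs : List Char) (i : Nat) (q : Char) (s : Nat) (r : List (Int × Int)),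
    i ≤ cs.length → cs.length - i ≤ n →
    pvALoop cs i (some q) s false r =
      (if PySem.Chars.findFrom cs [q] (i : Int) none = -1 then r
       else pvALoop cs ((PySem.Chars.findFrom cs [q] (i : Int) none).toNat + 1) none s false
         (r ++ [((s : Int), PySem.Chars.findFrom cs [q] (i : Int) none + 1)])) := by
  induction n with
  | zero =>
    intro cs i q s r hile hn
    have hi : i = cs.length := by omega
    have hnl : ¬ i < cs.length := by omega
    rw [pvALoop, dif_neg hnl]
    have hfz : PySem.Chars.findFrom cs [q] (i : Int) none = -1 := by
      refine (PySem.Chars.findFrom_natCast_eq_neg_one_iff cs [q] i hile).2 ?_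
      rw [hi]; simp
    rw [if_pos hfz]
  | succ m ih =>
    intro cs i q s r hile hn
    by_cases hi : i < cs.length
    · rw [pvALoop, dif_pos hi]
      simp only [Bool.false_eq_true, if_false]
      rw [pv_findFrom_step cs q i hi]
      by_cases hc : cs[i] = q
      · rw [if_pos hc, if_pos hc]
        rw [if_neg (show ¬ (i : Int) = -1 by omega)]
        norm_num
      · rw [if_neg hc, if_neg hc]
        have hcast : ((i + 1 : Nat) : Int) = (i : Int) + 1 := by push_cast; ring
        rw [← hcast]
        exact ih cs (i + 1) q s r (by omega) (by omega)
    · have hieq : i = cs.length := by omega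
      rw [pvALoop, dif_neg hi]
      have hfz : PySem.Chars.findFrom cs [q] (i : Int) none = -1 := by
        refine (PySem.Chars.findFrom_natCast_eq_neg_one_iff cs [q] i hile).2 ?_
        rw [hieq]; simp
      rw [if_pos hfz]

-- main loop equivalence
theorem pv_main (n : Nat) : ∀ (cs : List Char) (i : Nat) (s : Nat) (r : List (Int × Int)),
    cs.length - i ≤ n →
    pvALoop cs i none s false r = pvBLoop cs i r := by
  induction n with
  | zero =>
    intro cs i s r hn
    rw [pvALoop, pvBLoop]
    have : ¬ i < cs.length := by omega
    rw [dif_neg this, dif_neg this]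
  | succ m ih =>
    intro cs i s r hn
    by_cases hi : i < cs.length
    · rw [pvALoop, pvBLoop, dif_pos hi, dif_pos hi]
      simp only [Bool.false_eq_true, if_false]
      by_cases hq : cs[i] = '"' ∨ cs[i] = '\'' ∨ cs[i] = '`'
      · rw [if_pos hq, if_pos hq]
        rw [pv_scan (cs.length - (i + 1)) cs (i + 1) cs[i] i r (by omega) (le_refl _)]
        have hcast : ((i + 1 : Nat) : Int) = (i : Int) + 1 := by push_cast; ring
        rw [hcast]
        by_cases hj : PySem.Chars.findFrom cs [cs[i]] ((i : Int) + 1) none = -1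
        · rw [if_pos hj, if_pos hj]
        · rw [if_neg hj, if_neg hj]
          have hk : (i + 1 : Nat) ≤ cs.length := by omega
          have hspec := PySem.Chars.findFrom_natCast_spec cs [cs[i]] (i + 1) hk
            (by rw [hcast]; exact hj)
          rw [hcast] at hspec
          have h1 := hspec.1
          have hlt : i + 1 ≤ (PySem.Chars.findFrom cs [cs[i]] ((i : Int) + 1) none).toNat := by omega
          exact ih cs _ i _ (by omega)
      · rw [if_neg hq, if_neg hq]
        exact ih cs (i + 1) s r (by omega)
    · rw [pvALoop, pvBLoop, dif_neg hi, dif_neg hi]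

-- ===== VERDICT (by name: the statement is the Claim_ definition above) =====
theorem get_string_ranges_py_spec : Claim_equal_get_string_ranges_py := by
  intro text _
  unfold Spec_get_string_ranges_py get_string_ranges_py get_string_ranges_py_alt
  exact pv_main text.toList.length text.toList 0 0 [] (by omega)
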